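/- GENERATED by mk_final_copies.py from the proof of the farm's unit `start_decoder.R10` (farm:start_decoder.R10.2: Proof.lean) as the
   re-elaboration sweep compiled it — do not edit. -/
import Vorbis.Spec.Units.start_decoder_R10
import Vorbis.Spec.Worked.start_decoder_R10_Lemmas

open X86 X86.User Asan Vorbis

namespace Vorbis.Spec.start_decoder_R10

end Vorbis.Spec.start_decoder_R10

/-- The unit `start_decoder.R10` (the coupling loop 4110): `seg_r10` of Lemmas.lean — the entry walk, then `ReachVia.loop` over one
round of the loop, cut at the call returns 0x116248, 0x11628c, 0x1162a1, 0x1162ee. -/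
theorem Vorbis.Spec.Worked.start_decoder_R10_ok : Vorbis.Spec.start_decoder_R10.Statement := by
  unfold Vorbis.Spec.start_decoder_R10.Statement
  intro Lay hLay μ hμ u₀ hcode h_ilog h_get_bits h_load8 h_store1 h_load4 h_load1 h_error
  exact Vorbis.Spec.start_decoder_R10.seg_r10 Lay hLay μ hμ u₀ hcode h_ilog h_get_bits h_load8 h_store1 h_load4 h_load1 h_error
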